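-- pv_equiv track=rewrite | github.com/Trish-K/PythonProblems | labs109.py | oware_move
-- ===== SOURCE A (Python) =====
-- def oware_move(board, house):
--     border = (len(board)//2)-1
--     if board[house] == 0:
--         return board
--     count = house+1
--     while board[house] > 0:
--         if count > len(board)-1:
--             count = 0
--             board[count] += 1
--             board[house] -= 1
--             count += 1
--             continue
--         if count == house:
--             count += 1
--             continue
--         board[count] += 1
--         count += 1
--         board[house] -= 1
--
--     if count == 0:
--         count = len(board)-1
--     else:
--         count -= 1
--     if count < border:
--         return board
--     for i in range(count,border,-1):
--         if board[i] == 2 or board[i] == 3: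
--             board[i] = 0
--         else:
--             break
--     return board
-- ===== SOURCE B (Python) =====
-- def oware_move(board, house):
--     n = len(board)
--     border = n // 2 - 1
--     seeds = board[house]
--     if seeds <= 0:
--         return board
--     q, r = divmod(seeds, n - 1)
--     board[:] = [0 if i == house else v + q + (1 if (i - house) % n <= r else 0)
--                 for i, v in enumerate(board)]
--     last = (house + (r if r > 0 else n - 1)) % n
--     if last < border:
--         return board
--     for i in range(last, border, -1):
--         if board[i] in (2, 3):
--             board[i] = 0
--         else:
--             break
--     return board
-- ===== Notes on version B (the rewrite author's own statement) =====
-- stated objective: alternative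
-- what changed: A sows one seed per loop iteration; B computes every house's gain at once in closed form with divmod over the n-1 non-origin houses and derives the landing index directly, then runs the same capture scan.
-- outside the precondition, e.g. on oware_move([4, 1, 2], -1): A returns [5, 0, 0], B returns [5, 0, 4]
import Mathlib
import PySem

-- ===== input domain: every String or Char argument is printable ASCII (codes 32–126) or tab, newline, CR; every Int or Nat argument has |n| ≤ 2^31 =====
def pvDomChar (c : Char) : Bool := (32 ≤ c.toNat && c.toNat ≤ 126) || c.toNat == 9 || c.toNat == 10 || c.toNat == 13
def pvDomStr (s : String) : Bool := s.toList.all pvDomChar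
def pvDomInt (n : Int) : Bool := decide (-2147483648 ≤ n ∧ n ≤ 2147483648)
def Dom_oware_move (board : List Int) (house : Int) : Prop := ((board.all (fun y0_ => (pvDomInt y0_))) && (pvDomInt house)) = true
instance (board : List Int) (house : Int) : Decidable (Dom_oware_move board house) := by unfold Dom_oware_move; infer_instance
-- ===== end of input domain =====

-- B replaces A's seed-by-seed sowing loop with a divmod closed form computed per house;
-- both Pythons mutate `board` in place and return it — the equivalence proved here is about the return value.

-- ===== PORT A =====
-- board[i] read/write (indices are in range on Pre_ inputs)
def owGet (b : List Int) (i : Int) : Int := PySem.List.pyGetD b i 0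
-- board[i] += 1 / board[i] -= 1
def owInc (b : List Int) (i : Int) : List Int := PySem.List.pySetD b i (PySem.List.pyGetD b i 0 + 1)
def owDec (b : List Int) (i : Int) : List Int := PySem.List.pySetD b i (PySem.List.pyGetD b i 0 - 1)

-- A's while loop (fuel makes the recursion total; 2*seeds+2 steps suffice, proved below)
def owLoopA (house : Int) (b : List Int) (count : Int) (fuel : Nat) : List Int × Int :=
  match fuel with
  | 0 => (b, count)
  | fuel + 1 =>
    if owGet b house > 0 then
      if count > (b.length : Int) - 1 then
        -- count = 0; board[count] += 1; board[house] -= 1; count += 1; continue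
        owLoopA house (owDec (owInc b 0) house) 1 fuel
      else if count = house then
        owLoopA house b (count + 1) fuel
      else
        owLoopA house (owDec (owInc b count) house) (count + 1) fuel
    else (b, count)

-- the capture loop 'for i in range(count, border, -1): …' — identical text in A and in B, shared
def owCapture (border : Int) (b : List Int) (i : Int) : List Int :=
  if h : border < i then
    if owGet b i = 2 ∨ owGet b i = 3 then owCapture border (PySem.List.pySetD b i 0) (i - 1)
    else b
  else b
termination_by (i - border).toNat
decreasing_by
  have : 0 < i - border := by omega
  omega

def oware_move (board : List Int) (house : Int) : List Int :=
  let border : Int := PySem.Int.floordiv (board.length : Int) 2 - 1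
  if owGet board house = 0 then board
  else
    let p := owLoopA house board (house + 1) (2 * (owGet board house).toNat + 2)
    let count : Int := if p.2 = 0 then (board.length : Int) - 1 else p.2 - 1
    if count < border then p.1
    else owCapture border p.1 count

-- ===== PORT B =====
def oware_move_alt (board : List Int) (house : Int) : List Int :=
  let n := board.length
  let border : Int := PySem.Int.floordiv (n : Int) 2 - 1
  let seeds := PySem.List.pyGetD board house 0
  if seeds ≤ 0 then board
  else
    let q := PySem.Int.floordiv seeds ((n : Int) - 1)
    let r := PySem.Int.mod seeds ((n : Int) - 1)
    let b := (PySem.List.enumerate board).map (fun iv =>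
      if iv.1 = house then 0
      else iv.2 + q + (if PySem.Int.mod (iv.1 - house) (n : Int) ≤ r then 1 else 0))
    let last := PySem.Int.mod (house + (if 0 < r then r else (n : Int) - 1)) (n : Int)
    if last < border then b
    else owCapture border b last

-- ===== PRECONDITION & SPEC =====
-- Pre_ excludes only: house indices outside Python's range (A raises IndexError), length-1
-- boards with seeds to sow (A loops forever), and negative house indices with seeds to sow,
-- where A's Python-wraparound sowing into the origin house is an accident of the loop's counter
-- that B does not reproduce (with nothing to sow, <= 0 seeds, A returns the board unchanged for
-- every in-range house and B matches it, so those inputs stay inside Pre_).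
def Pre_oware_move (board : List Int) (house : Int) : Prop :=
  -(board.length : Int) ≤ house ∧ house < (board.length : Int) ∧
    (PySem.List.pyGetD board house 0 ≤ 0 ∨ (0 ≤ house ∧ 2 ≤ board.length))
instance (board : List Int) (house : Int) : Decidable (Pre_oware_move board house) := by
  unfold Pre_oware_move; infer_instance

def pvWitness_oware_move : List Int × Int := ([4, 1, 2, 0], 0)

def Spec_oware_move (board : List Int) (house : Int) (out : List Int) : Prop := out = oware_move_alt board house
instance (board : List Int) (house : Int) (out : List Int) : Decidable (Spec_oware_move board house out) := by unfold Spec_oware_move; infer_instance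

-- ===== CLAIM (what is proved, stated in full; the proofs are below) =====
def Claim_equal_oware_move : Prop := ∀ (board : List Int) (house : Int), Dom_oware_move board house → Pre_oware_move board house → Spec_oware_move board house (oware_move board house)

-- ===== LEMMAS AND PROOFS =====

-- the landing index of the next seed when the loop counter is c (0 ≤ c ≤ n, house H < n)
def owLand (n H c : Nat) : Nat :=
  if n ≤ (if c = H then c + 1 else c) then (if H = 0 then 1 else 0)
  else (if c = H then c + 1 else c)

-- simple model of A's while loop: one recursive step per seed
def owModel (n H : Nat) (s : Nat) (b : List Int) (c : Nat) : List Int × Nat :=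
  match s with
  | 0 => (b, c)
  | s + 1 =>
    let l := owLand n H c
    owModel n H s (owDec (owInc b (l : Int)) (H : Int)) (l + 1)

-- offset of house i from the origin H in sowing order (1 .. n-1 for i ≠ H, 0 for i = H)
def owOff (n H i : Nat) : Nat := (i + n - H) % n

-- landing index of seed number s (s ≥ 1)
def owIdx (n H s : Nat) : Nat := (H + 1 + (s - 1) % (n - 1)) % n

lemma owGet_cast (b : List Int) (k : Nat) : owGet b (k : Int) = b.getD k 0 := by
  simp [owGet]

lemma owInc_cast (b : List Int) (k : Nat) : owInc b (k : Int) = b.set k (b.getD k 0 + 1) := by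
  simp [owInc]

lemma owDec_cast (b : List Int) (k : Nat) : owDec b (k : Int) = b.set k (b.getD k 0 - 1) := by
  simp [owDec]

lemma getD_set' (b : List Int) (k j : Nat) (v : Int) (hk : k < b.length) (hj : j < b.length) :
    (b.set k v).getD j 0 = if j = k then v else b.getD j 0 := by
  by_cases h : j = k
  · subst h; simp [List.getD_eq_getElem?_getD, hk]
  · simp [List.getD_eq_getElem?_getD, List.getElem?_set_ne, Ne.symm h, h]

lemma mod_split (n H t : Nat) (hH : H < n) (ht : t < n) :
    (H + t) % n = if H + t < n then H + t else H + t - n := by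
  split_ifs with h
  · exact Nat.mod_eq_of_lt h
  · conv_lhs => rw [show H + t = (H + t - n) + n from by omega]
    rw [Nat.add_mod_right]; exact Nat.mod_eq_of_lt (by omega)

lemma owOff_lt (n H i : Nat) (hn : 0 < n) : owOff n H i < n := Nat.mod_lt _ hn

lemma owOff_pos (n H i : Nat) (hH : H < n) (hi : i < n) (hne : i ≠ H) : 1 ≤ owOff n H i := by
  unfold owOff
  rcases Nat.eq_zero_or_pos ((i + n - H) % n) with h | h
  · exfalso
    obtain ⟨k, hk⟩ := Nat.dvd_of_mod_eq_zero h
    have h2 : k < 2 := by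
      by_contra hc
      have : 2 * n ≤ n * k := by nlinarith
      omega
    interval_cases k <;> omega
  · omega

lemma owOff_spec (n H t : Nat) (hH : H < n) (ht : t < n) : owOff n H ((H + t) % n) = t := by
  unfold owOff
  rw [mod_split n H t hH ht]
  split_ifs with h
  · conv_lhs => rw [show H + t + n - H = t + n from by omega]
    rw [Nat.add_mod_right]; exact Nat.mod_eq_of_lt ht
  · conv_lhs => rw [show H + t - n + n - H = t from by omega]
    exact Nat.mod_eq_of_lt ht

lemma owOff_self (n H : Nat) (hH : H < n) : owOff n H H = 0 := by
  unfold owOff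
  rw [show H + n - H = n from by omega, Nat.mod_self]

lemma owOff_recover (n H i : Nat) (hH : H < n) (hi : i < n) : (H + owOff n H i) % n = i := by
  unfold owOff
  have hd := Nat.div_add_mod (i + n - H) n
  have hm : (i + n - H) % n < n := Nat.mod_lt _ (by omega)
  have hk : (i + n - H) / n < 2 := Nat.div_lt_of_lt_mul (by omega)
  generalize hq : (i + n - H) / n = k at hd hk
  have hk2 : k = 0 ∨ k = 1 := by omega
  rcases hk2 with h4 | h4 <;> rw [h4] at hd
  · rw [show H + (i + n - H) % n = i + n from by omega, Nat.add_mod_right]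
    exact Nat.mod_eq_of_lt hi
  · rw [show H + (i + n - H) % n = i from by omega]
    exact Nat.mod_eq_of_lt hi

lemma owOff_inj (n H i j : Nat) (hH : H < n) (hi : i < n) (hj : j < n)
    (h : owOff n H i = owOff n H j) : i = j := by
  rw [← owOff_recover n H i hH hi, ← owOff_recover n H j hH hj, h]

-- division/modulus step facts (m = n-1 ≥ 1)
lemma mod_div_succ_lt (m s : Nat) (hm : 0 < m) (h : s % m < m - 1) :
    (s + 1) % m = s % m + 1 ∧ (s + 1) / m = s / m := by
  have hd := Nat.div_add_mod s m
  constructor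
  · conv_lhs => rw [show s + 1 = (s % m + 1) + m * (s / m) from by omega]
    rw [Nat.add_mul_mod_self_left]; exact Nat.mod_eq_of_lt (by omega)
  · conv_lhs => rw [show s + 1 = (s % m + 1) + m * (s / m) from by omega]
    rw [Nat.add_mul_div_left _ _ hm, Nat.div_eq_of_lt (by omega)]; omega

lemma mod_div_succ_eq (m s : Nat) (hm : 0 < m) (h : s % m = m - 1) :
    (s + 1) % m = 0 ∧ (s + 1) / m = s / m + 1 := by
  have hd := Nat.div_add_mod s m
  have hmul : m * (s / m + 1) = m * (s / m) + m := by ring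
  have hs : s + 1 = m * (s / m + 1) := by omega
  constructor
  · rw [hs, Nat.mul_mod_right]
  · rw [hs, Nat.mul_div_cancel_left _ hm]

lemma owIdx_off (n H s : Nat) (hn : 2 ≤ n) (hH : H < n) (hs : 1 ≤ s) :
    owOff n H (owIdx n H s) = (s - 1) % (n - 1) + 1 := by
  have hu : (s - 1) % (n - 1) < n - 1 := Nat.mod_lt _ (by omega)
  unfold owIdx
  rw [show H + 1 + (s - 1) % (n - 1) = H + ((s - 1) % (n - 1) + 1) from by omega]
  exact owOff_spec n H _ hH (by omega)

lemma owIdx_lt (n H s : Nat) (hn : 2 ≤ n) (hH : H < n) : owIdx n H s < n :=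
  Nat.mod_lt _ (by omega)

lemma owIdx_ne (n H s : Nat) (hn : 2 ≤ n) (hH : H < n) (hs : 1 ≤ s) : owIdx n H s ≠ H := by
  intro h
  have h1 := owIdx_off n H s hn hH hs
  rw [h, owOff_self n H hH] at h1
  omega

lemma owLand_mid (n H s : Nat) (hn : 2 ≤ n) (hH : H < n) :
    owLand n H (if s = 0 then H + 1 else owIdx n H s + 1) = owIdx n H (s + 1) := by
  have hm : 0 < n - 1 := by omega
  by_cases hs : s = 0
  · subst hs
    rw [if_pos rfl]
    have h1 : owIdx n H (0 + 1) = (H + 1) % n := by unfold owIdx; norm_num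
    rw [h1, mod_split n H 1 hH (by omega)]
    unfold owLand
    split_ifs <;> omega
  · have hs1 : 1 ≤ s := by omega
    rw [if_neg hs]
    have hu : (s - 1) % (n - 1) < n - 1 := Nat.mod_lt _ hm
    set u := (s - 1) % (n - 1) with hudef
    have he_off : owOff n H (owIdx n H s) = u + 1 := owIdx_off n H s hn hH hs1
    have he_lt : owIdx n H s < n := owIdx_lt n H s hn hH
    have he_rec : (H + (u + 1)) % n = owIdx n H s := by
      rw [← he_off]; exact owOff_recover n H _ hH he_lt
    have he_val : owIdx n H s = if H + (u + 1) < n then H + (u + 1) else H + (u + 1) - n := by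
      rw [← he_rec, mod_split n H (u + 1) hH (by omega)]
    have hv : s % (n - 1) < n - 1 := Nat.mod_lt _ hm
    have hsm : (u < n - 1 - 1 ∧ s % (n - 1) = u + 1) ∨ (u = n - 1 - 1 ∧ s % (n - 1) = 0) := by
      by_cases hc : u < n - 1 - 1
      · left
        refine ⟨hc, ?_⟩
        have h2 := (mod_div_succ_lt (n - 1) (s - 1) hm (by omega)).1
        rw [show s - 1 + 1 = s from by omega] at h2
        omega
      · right
        refine ⟨by omega, ?_⟩
        have h2 := (mod_div_succ_eq (n - 1) (s - 1) hm (by omega)).1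
        rw [show s - 1 + 1 = s from by omega] at h2
        omega
    have htgt : owIdx n H (s + 1) = (H + (1 + s % (n - 1))) % n := by
      unfold owIdx
      rw [show s + 1 - 1 = s from rfl, show H + 1 + s % (n - 1) = H + (1 + s % (n - 1)) from by omega]
    rcases hsm with ⟨h1, h2⟩ | ⟨h1, h2⟩ <;> split_ifs at he_val with hc <;>
      rw [htgt, mod_split n H (1 + s % (n - 1)) hH (by omega), he_val] <;>
      (unfold owLand; split_ifs <;> omega)

lemma owLoopA_succ (house : Int) (b : List Int) (count : Int) (fuel : Nat) :
    owLoopA house b count (fuel + 1) =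
      if owGet b house > 0 then
        (if count > (b.length : Int) - 1 then owLoopA house (owDec (owInc b 0) house) 1 fuel
         else if count = house then owLoopA house b (count + 1) fuel
         else owLoopA house (owDec (owInc b count) house) (count + 1) fuel)
      else (b, count) := rfl

lemma sow_len (b : List Int) (l H' : Nat) :
    (owDec (owInc b (l : Int)) (H' : Int)).length = b.length := by
  rw [owInc_cast, owDec_cast]; simp

lemma sow_getD (b : List Int) (l H' j : Nat) (hl : l < b.length) (hj : j < b.length)
    (hH : H' < b.length) :
    (owDec (owInc b (l : Int)) (H' : Int)).getD j 0 =
      b.getD j 0 + (if j = l then 1 else 0) - (if j = H' then 1 else 0) := by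
  rw [owInc_cast, owDec_cast]
  rw [getD_set' _ _ _ _ (by simpa using hH) (by simpa using hj),
      getD_set' _ _ _ _ hl hH, getD_set' _ _ _ _ hl hj]
  split_ifs <;> subst_vars <;> omega

lemma sow_cancel (b : List Int) (k : Nat) (hk : k < b.length) :
    owDec (owInc b (k : Int)) (k : Int) = b := by
  rw [owInc_cast, owDec_cast, getD_set' _ _ _ _ hk hk, if_pos rfl, List.set_set]
  rw [show b.getD k 0 + 1 - 1 = b.getD k 0 from by ring]
  conv_lhs => rw [show b.getD k 0 = b[k] from List.getD_eq_getElem b 0 hk]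
  exact List.set_getElem_self hk

lemma sow_getD_house (b : List Int) (l H' : Nat) (hl : l < b.length) (hH : H' < b.length)
    (hne : ¬ l = H') (s : Nat) (hbH : b.getD H' 0 = ((s + 1 : Nat) : Int)) :
    (owDec (owInc b (l : Int)) (H' : Int)).getD H' 0 = (s : Int) := by
  rw [sow_getD b l H' H' hl hH hH, if_neg (by omega), if_pos rfl]
  push_cast at hbH ⊢
  omega

lemma owModel_succ (n H : Nat) : ∀ (s : Nat) (b : List Int) (c : Nat),
    owModel n H (s + 1) b c =
      (owDec (owInc (owModel n H s b c).1 ((owLand n H (owModel n H s b c).2) : Int)) (H : Int),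
        owLand n H (owModel n H s b c).2 + 1) := by
  intro s
  induction s with
  | zero => intro b c; rfl
  | succ s ih =>
    intro b c
    rw [show owModel n H (s + 1 + 1) b c
          = owModel n H (s + 1) (owDec (owInc b ((owLand n H c : Nat) : Int)) (H : Int))
              (owLand n H c + 1) from rfl,
        ih,
        show owModel n H (s + 1) b c
          = owModel n H s (owDec (owInc b ((owLand n H c : Nat) : Int)) (H : Int))
              (owLand n H c + 1) from rfl]

lemma loopA_eq_model (n H : Nat) (hn : 2 ≤ n) (hH : H < n) :
    ∀ (s fuel : Nat) (b : List Int) (c : Nat), b.length = n → b.getD H 0 = (s : Int) →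
      1 ≤ c → c ≤ n → 2 * s ≤ fuel →
      owLoopA (H : Int) b (c : Int) fuel = ((owModel n H s b c).1, ((owModel n H s b c).2 : Int)) := by
  intro s
  induction s with
  | zero =>
    intro fuel b c hb hbH hc1 hc2 hfuel
    cases fuel with
    | zero => rfl
    | succ f =>
      rw [owLoopA_succ, owGet_cast, hbH]
      norm_num [owModel]
  | succ s ih =>
    intro fuel b c hb hbH hc1 hc2 hfuel
    obtain ⟨f, rfl⟩ : ∃ f, fuel = f + 1 := ⟨fuel - 1, by omega⟩
    have hpos : owGet b ((H : Nat) : Int) > 0 := by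
      rw [owGet_cast, hbH]; exact_mod_cast Nat.succ_pos s
    rw [owLoopA_succ, if_pos hpos]
    rw [show owModel n H (s + 1) b c
          = owModel n H s (owDec (owInc b ((owLand n H c : Nat) : Int)) (H : Int))
              (owLand n H c + 1) from rfl]
    by_cases hcn : c = n
    · have hcond : ((c : Nat) : Int) > (b.length : Int) - 1 := by
        rw [hb]; subst hcn; push_cast; omega
      rw [if_pos hcond]
      have hLand : owLand n H c = if H = 0 then 1 else 0 := by
        unfold owLand
        rw [if_pos (by split_ifs <;> omega)]
      by_cases hH0 : H = 0
      · subst hH0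
        rw [hLand, if_pos rfl]
        rw [show ((0 : Nat) : Int) = (0 : Int) from by norm_num]
        have hb' : owDec (owInc b 0) (0 : Int) = b := by
          have h := sow_cancel b 0 (by omega)
          norm_num at h
          exact h
        rw [hb']
        obtain ⟨g, rfl⟩ : ∃ g, f = g + 1 := ⟨f - 1, by omega⟩
        have hpos' : owGet b (0 : Int) > 0 := by
          have := hpos; norm_num at this; exact this
        rw [owLoopA_succ, if_pos hpos',
            if_neg (by rw [hb]; push_cast; omega),
            if_neg (by norm_num)]
        have ihres := ih g (owDec (owInc b ((1 : Nat) : Int)) ((0 : Nat) : Int)) 2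
          (by rw [sow_len]; exact hb)
          (sow_getD_house b 1 0 (by omega) (by omega) (by omega) s hbH)
          (by omega) (by omega) (by omega)
        norm_num at ihres ⊢
        exact ihres
      · rw [hLand, if_neg hH0]
        have ihres := ih f (owDec (owInc b ((0 : Nat) : Int)) ((H : Nat) : Int)) 1
          (by rw [sow_len]; exact hb)
          (sow_getD_house b 0 H (by omega) (by omega) (by omega) s hbH)
          (by omega) (by omega) (by omega)
        norm_num at ihres ⊢
        exact ihres
    · have hcond : ¬ (((c : Nat) : Int) > (b.length : Int) - 1) := by
        rw [hb]; push_cast; omega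
      rw [if_neg hcond]
      by_cases hcH : c = H
      · rw [if_pos (by exact_mod_cast congrArg (Nat.cast : Nat → Int) hcH)]
        obtain ⟨g, rfl⟩ : ∃ g, f = g + 1 := ⟨f - 1, by omega⟩
        rw [owLoopA_succ, if_pos hpos]
        have hLand : owLand n H c = if H + 1 = n then 0 else H + 1 := by
          unfold owLand
          subst hcH
          split_ifs <;> omega
        by_cases hHtop : H + 1 = n
        · rw [if_pos (by rw [hb]; subst hcH; push_cast; omega)]
          rw [hLand, if_pos hHtop]
          have ihres := ih g (owDec (owInc b ((0 : Nat) : Int)) ((H : Nat) : Int)) 1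
            (by rw [sow_len]; exact hb)
            (sow_getD_house b 0 H (by omega) (by omega) (by omega) s hbH)
            (by omega) (by omega) (by omega)
          norm_num at ihres ⊢
          exact ihres
        · rw [if_neg (by rw [hb]; subst hcH; push_cast; omega),
              if_neg (by subst hcH; push_cast; omega)]
          rw [hLand, if_neg hHtop]
          have ihres := ih g (owDec (owInc b ((H + 1 : Nat) : Int)) ((H : Nat) : Int)) (H + 1 + 1)
            (by rw [sow_len]; exact hb)
            (sow_getD_house b (H + 1) H (by omega) (by omega) (by omega) s hbH)
            (by omega) (by omega) (by omega)
          subst hcH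
          push_cast at ihres ⊢
          exact ihres
      · rw [if_neg (by intro h; exact hcH (by exact_mod_cast h))]
        have hLand : owLand n H c = c := by
          unfold owLand
          rw [if_neg hcH, if_neg (by omega)]
        rw [hLand]
        have ihres := ih f (owDec (owInc b ((c : Nat) : Int)) ((H : Nat) : Int)) (c + 1)
          (by rw [sow_len]; exact hb)
          (sow_getD_house b c H (by omega) (by omega) hcH s hbH)
          (by omega) (by omega) (by omega)
        push_cast at ihres ⊢
        exact ihres

lemma model_closed (n H : Nat) (hn : 2 ≤ n) (hH : H < n) (b0 : List Int) (hb : b0.length = n) :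
    ∀ s : Nat,
      (owModel n H s b0 (H + 1)).1.length = n ∧
      (owModel n H s b0 (H + 1)).2 = (if s = 0 then H + 1 else owIdx n H s + 1) ∧
      (owModel n H s b0 (H + 1)).1.getD H 0 = b0.getD H 0 - (s : Int) ∧
      (∀ i, i < n → i ≠ H →
        (owModel n H s b0 (H + 1)).1.getD i 0 =
          b0.getD i 0 + ((s / (n - 1) : Nat) : Int) +
            (if owOff n H i ≤ s % (n - 1) then 1 else 0)) := by
  intro s
  induction s with
  | zero =>
    refine ⟨hb, rfl, ?_, ?_⟩
    · show b0.getD H 0 = b0.getD H 0 - ((0 : Nat) : Int)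
      norm_num
    · intro i hi hiH
      show b0.getD i 0 = b0.getD i 0 + ((0 / (n - 1) : Nat) : Int) +
        (if owOff n H i ≤ 0 % (n - 1) then 1 else 0)
      rw [Nat.zero_div, Nat.zero_mod, if_neg (by have := owOff_pos n H i hH hi hiH; omega)]
      norm_num
  | succ s ih =>
    obtain ⟨hlen, hcnt, hhouse, hother⟩ := ih
    rw [owModel_succ, hcnt, owLand_mid n H s hn hH]
    dsimp only
    have hl_lt : owIdx n H (s + 1) < n := owIdx_lt n H (s + 1) hn hH
    have hl_ne : owIdx n H (s + 1) ≠ H := owIdx_ne n H (s + 1) hn hH (by omega)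
    have hl_off : owOff n H (owIdx n H (s + 1)) = s % (n - 1) + 1 := by
      have h := owIdx_off n H (s + 1) hn hH (by omega)
      simpa using h
    have hm : 0 < n - 1 := by omega
    refine ⟨by rw [sow_len]; exact hlen, by simp, ?_, ?_⟩
    · rw [sow_getD _ _ H H (by omega) (by omega) (by omega),
          if_neg (Ne.symm hl_ne), if_pos rfl, hhouse]
      push_cast
      ring
    · intro i hi hiH
      rw [sow_getD _ _ H i (by omega) (by omega) (by omega),
          if_neg hiH, hother i hi hiH]
      have hoff_pos := owOff_pos n H i hH hi hiH
      have hoff_lt : owOff n H i < n := owOff_lt n H i (by omega)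
      have hiff : i = owIdx n H (s + 1) ↔ owOff n H i = s % (n - 1) + 1 := by
        constructor
        · intro h; rw [h, hl_off]
        · intro h; exact owOff_inj n H i _ hH hi hl_lt (by rw [h, hl_off])
      have hv : s % (n - 1) < n - 1 := Nat.mod_lt _ hm
      by_cases hcase : s % (n - 1) < n - 1 - 1
      · obtain ⟨hm1, hd1⟩ := mod_div_succ_lt (n - 1) s hm hcase
        rw [hm1, hd1]
        by_cases hil : i = owIdx n H (s + 1)
        · have ho := hiff.1 hil
          rw [if_pos hil]
          split_ifs <;> push_cast <;> omega
        · have ho : owOff n H i ≠ s % (n - 1) + 1 := fun h => hil (hiff.2 h)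
          rw [if_neg hil]
          split_ifs <;> push_cast <;> omega
      · obtain ⟨hm1, hd1⟩ := mod_div_succ_eq (n - 1) s hm (by omega)
        rw [hm1, hd1]
        by_cases hil : i = owIdx n H (s + 1)
        · have ho := hiff.1 hil
          rw [if_pos hil]
          split_ifs <;> push_cast <;> omega
        · have ho : owOff n H i ≠ s % (n - 1) + 1 := fun h => hil (hiff.2 h)
          rw [if_neg hil]
          split_ifs <;> push_cast <;> omega

lemma mod_bridge (n H i : Nat) (hn : 0 < n) (hH : H < n) (hi : i < n) :
    PySem.Int.mod ((i : Int) - (H : Int)) (n : Int) = ((owOff n H i : Nat) : Int) := by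
  rw [PySem.Int.mod_eq_emod_of_pos (by exact_mod_cast hn)]
  have h1 : (i : Int) - (H : Int) = ((i + n - H : Nat) : Int) - (n : Int) := by omega
  rw [h1, Int.sub_emod_right, ← Int.natCast_mod]
  rfl

lemma owIdx_last (n H S : Nat) (hn : 2 ≤ n) (hH : H < n) (hS : 1 ≤ S) :
    owIdx n H S = (H + (if 0 < S % (n - 1) then S % (n - 1) else n - 1)) % n := by
  have hm : 0 < n - 1 := by omega
  by_cases h0 : S % (n - 1) = 0
  · rw [if_neg (by omega)]
    have hu : (S - 1) % (n - 1) = n - 1 - 1 := by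
      by_contra hc
      have hv : (S - 1) % (n - 1) < n - 1 := Nat.mod_lt _ hm
      have h2 := (mod_div_succ_lt (n - 1) (S - 1) hm (by omega)).1
      rw [show S - 1 + 1 = S from by omega] at h2
      omega
    unfold owIdx
    rw [hu, show H + 1 + (n - 1 - 1) = H + (n - 1) from by omega]
  · rw [if_pos (by omega)]
    have hv : (S - 1) % (n - 1) < n - 1 := Nat.mod_lt _ hm
    have hu : (S - 1) % (n - 1) + 1 = S % (n - 1) := by
      by_cases hc : (S - 1) % (n - 1) < n - 1 - 1
      · have h2 := (mod_div_succ_lt (n - 1) (S - 1) hm hc).1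
        rw [show S - 1 + 1 = S from by omega] at h2
        omega
      · have h2 := (mod_div_succ_eq (n - 1) (S - 1) hm (by omega)).1
        rw [show S - 1 + 1 = S from by omega] at h2
        omega
    unfold owIdx
    rw [show H + 1 + (S - 1) % (n - 1) = H + ((S - 1) % (n - 1) + 1) from by omega, hu]

theorem oware_move_spec : Claim_equal_oware_move := by
  unfold Claim_equal_oware_move Spec_oware_move
  intro board house hdom hpre
  obtain ⟨hlo, hhi, hcase⟩ := hpre
  by_cases hpos : 0 < PySem.List.pyGetD board house 0
  · -- something to sow: house is a valid non-negative index and there are at least two houses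
    obtain ⟨hh0, hn2⟩ : 0 ≤ house ∧ 2 ≤ board.length := by
      rcases hcase with h | h
      · omega
      · exact h
    obtain ⟨Hn, rfl⟩ : ∃ h : Nat, house = (h : Int) := ⟨house.toNat, by omega⟩
    have hgetd : PySem.List.pyGetD board ((Hn : Nat) : Int) 0 = board.getD Hn 0 := by simp
    have hH : Hn < board.length := by exact_mod_cast hhi
    have hs0 : 0 ≤ board.getD Hn 0 := by rw [← hgetd]; omega
    obtain ⟨S, hS⟩ : ∃ S : Nat, board.getD Hn 0 = (S : Int) :=
      ⟨(board.getD Hn 0).toNat, by omega⟩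
    have hz : ¬ S = 0 := by
      intro h
      rw [hgetd, hS, h] at hpos
      norm_num at hpos
    have hS1 : 1 ≤ S := by omega
    have hm : 0 < board.length - 1 := by omega
    obtain ⟨hlen, hcnt, hhouse, hother⟩ := model_closed board.length Hn hn2 hH board rfl S
    have hL_lt : owIdx board.length Hn S < board.length := owIdx_lt board.length Hn S hn2 hH
    have hloop := loopA_eq_model board.length Hn hn2 hH S (2 * S + 2) board (Hn + 1) rfl hS
      (by omega) (by omega) (by omega)
    have hA : oware_move board ((Hn : Nat) : Int)
        = (if ((owIdx board.length Hn S : Nat) : Int) < PySem.Int.floordiv (board.length : Int) 2 - 1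
           then (owModel board.length Hn S board (Hn + 1)).1
           else owCapture (PySem.Int.floordiv (board.length : Int) 2 - 1)
                  (owModel board.length Hn S board (Hn + 1)).1
                  ((owIdx board.length Hn S : Nat) : Int)) := by
      simp only [oware_move]
      rw [if_neg (by rw [owGet_cast, hS]; exact_mod_cast hz)]
      rw [show (2 * (owGet board ((Hn : Nat) : Int)).toNat + 2) = 2 * S + 2 from by
            rw [owGet_cast, hS]; simp]
      rw [show ((Hn : Nat) : Int) + 1 = ((Hn + 1 : Nat) : Int) from by push_cast; ring]
      rw [hloop]
      dsimp only
      rw [hcnt, if_neg hz,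
          if_neg (show ¬(((owIdx board.length Hn S + 1 : Nat) : Int) = 0) from by
            push_cast; omega),
          show ((owIdx board.length Hn S + 1 : Nat) : Int) - 1
            = ((owIdx board.length Hn S : Nat) : Int) from by push_cast; ring]
    rw [hA]
    simp only [oware_move_alt]
    rw [if_neg (show ¬(PySem.List.pyGetD board ((Hn : Nat) : Int) 0 ≤ 0) from by
      rw [hgetd, hS]; push_cast; omega)]
    rw [hgetd, hS]
    rw [show ((board.length : Int) - 1) = ((board.length - 1 : Nat) : Int) from by omega]
    rw [show PySem.Int.floordiv ((S : Nat) : Int) ((board.length - 1 : Nat) : Int)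
          = ((S / (board.length - 1) : Nat) : Int) from by simp]
    rw [show PySem.Int.mod ((S : Nat) : Int) ((board.length - 1 : Nat) : Int)
          = ((S % (board.length - 1) : Nat) : Int) from by simp]
    have hlast : PySem.Int.mod ((Hn : Int) +
          (if (0 : Int) < ((S % (board.length - 1) : Nat) : Int)
           then ((S % (board.length - 1) : Nat) : Int)
           else ((board.length - 1 : Nat) : Int))) (board.length : Int)
        = ((owIdx board.length Hn S : Nat) : Int) := by
      rw [show (if (0 : Int) < ((S % (board.length - 1) : Nat) : Int)
                then ((S % (board.length - 1) : Nat) : Int)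
                else ((board.length - 1 : Nat) : Int))
            = ((if 0 < S % (board.length - 1) then S % (board.length - 1)
                else board.length - 1 : Nat) : Int) from by
            by_cases h0 : 0 < S % (board.length - 1)
            · rw [if_pos (by exact_mod_cast h0), if_pos h0]
            · rw [if_neg (by exact_mod_cast h0), if_neg h0]]
      rw [show (Hn : Int) + ((if 0 < S % (board.length - 1) then S % (board.length - 1)
                else board.length - 1 : Nat) : Int)
            = ((Hn + (if 0 < S % (board.length - 1) then S % (board.length - 1)
                else board.length - 1) : Nat) : Int) from by push_cast; ring]
      rw [PySem.Int.mod_natCast]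
      rw [← owIdx_last board.length Hn S hn2 hH hS1]
    rw [hlast]
    have key : ∀ (x y : List Int) (i b' : Int), x = y →
        (if i < b' then x else owCapture b' x i) = (if i < b' then y else owCapture b' y i) := by
      intro x y i b' h; rw [h]
    apply key
    apply List.ext_getElem
    · rw [hlen]; simp
    · intro k hk1 hk2
      have hk : k < board.length := by rw [hlen] at hk1; exact hk1
      simp only [List.getElem_map, PySem.List.getElem_enumerate, zero_add]
      by_cases hkH : k = Hn
      · subst hkH
        rw [if_pos rfl,
            ← List.getD_eq_getElem (owModel board.length k S board (k + 1)).1 0 hk1,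
            hhouse, hS]
        ring
      · rw [if_neg (show ¬((k : Int) = (Hn : Int)) from by exact_mod_cast hkH)]
        rw [mod_bridge board.length Hn k (by omega) hH hk]
        rw [show (if ((owOff board.length Hn k : Nat) : Int) ≤ ((S % (board.length - 1) : Nat) : Int)
                  then (1 : Int) else 0)
              = (if owOff board.length Hn k ≤ S % (board.length - 1) then (1 : Int) else 0) from by
              by_cases hc : owOff board.length Hn k ≤ S % (board.length - 1)
              · rw [if_pos (by exact_mod_cast hc), if_pos hc]
              · rw [if_neg (by exact_mod_cast hc), if_neg hc]]
        rw [← List.getD_eq_getElem (owModel board.length Hn S board (Hn + 1)).1 0 hk1,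
            ← List.getD_eq_getElem board 0 hk,
            hother k hk hkH]
  · -- nothing to sow (house holds ≤ 0 seeds): A leaves the board unchanged, so does B
    have hsle : PySem.List.pyGetD board house 0 ≤ 0 := by omega
    have hlen1 : 1 ≤ board.length := by omega
    have hB : oware_move_alt board house = board := by
      simp only [oware_move_alt]
      rw [if_pos hsle]
    rw [hB]
    simp only [oware_move]
    by_cases hz : owGet board house = 0
    · rw [if_pos hz]
    · rw [if_neg hz]
      have hneg : owGet board house < 0 := by
        have he : owGet board house = PySem.List.pyGetD board house 0 := rfl
        omega
      rw [show 2 * (owGet board house).toNat + 2 = (2 * (owGet board house).toNat + 1) + 1 from by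
            omega,
          owLoopA_succ, if_neg (show ¬(owGet board house > 0) from by omega)]
      dsimp only
      have hbord : PySem.Int.floordiv ((board.length : Nat) : Int) 2
          = ((board.length / 2 : Nat) : Int) := by
        exact_mod_cast PySem.Int.floordiv_natCast board.length 2
      by_cases hh1 : house + 1 = 0
      · rw [if_pos hh1]
        have hhm1 : house = -1 := by omega
        subst hhm1
        rw [if_neg (show ¬((board.length : Int) - 1
              < PySem.Int.floordiv (board.length : Int) 2 - 1) from by rw [hbord]; omega)]
        have hne : board ≠ [] := by
          intro h
          rw [h] at hlen1
          simp at hlen1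
        have e1 : owGet board ((board.length : Int) - 1) = board.getD (board.length - 1) 0 := by
          unfold owGet
          rw [show ((board.length : Int) - 1) = ((board.length - 1 : Nat) : Int) from by omega]
          simp
        have e2 : PySem.List.pyGetD board (-1) 0 = board.getD (board.length - 1) 0 := by
          rw [PySem.List.pyGetD_neg_one board 0 hne, List.getD_eq_getElem _ _ (by omega),
              List.getLast_eq_getElem]
        rw [owCapture, dif_pos (by rw [hbord]; omega),
            if_neg (by rw [e1, ← e2]; have he : owGet board (-1) = PySem.List.pyGetD board (-1) 0 := rfl; omega)]
      · rw [if_neg hh1, show house + 1 - 1 = house from by ring]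
        by_cases hsm : house < PySem.Int.floordiv ((board.length : Nat) : Int) 2 - 1
        · rw [if_pos hsm]
        · rw [if_neg hsm]
          rw [owCapture]
          by_cases hgt : PySem.Int.floordiv ((board.length : Nat) : Int) 2 - 1 < house
          · rw [dif_pos hgt,
                if_neg (by have he : owGet board house = PySem.List.pyGetD board house 0 := rfl
                           omega)]
          · rw [dif_neg hgt]
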